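-- pv_equiv track=rewrite | github.com/park9707/Algorithm | programmers/홀짝트리/홀짝트리.py | solution
-- ===== SOURCE A (Python) =====
-- from collections import defaultdict
--
-- def solution(nodes, edges):
--     def check(n):
--         visited[n] = True
--         if (n % 2 == 1 and len(e[n]) % 2 == 0) or (n % 2 == 0 and len(e[n]) % 2 == 1):
--             tr[0] += 1
--         else:
--             tr[1] += 1
--         for next_n in e[n]:
--             if not visited[next_n]:
--                 check(next_n)
--
--     answer = [0, 0]
--     e = defaultdict(list)
--     visited = {i: False for i in nodes}
--     for a, b in edges:
--         e[a].append(b)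
--         e[b].append(a)
--
--     for node in nodes:
--         if not visited[node]:
--             if len(e[node]) == 0:
--                 if node % 2 == 0:
--                     answer[0] += 1
--                 else:
--                     answer[1] += 1
--                 continue
--
--             tr = [0, 0]
--             check(node)
--
--             if tr[0] == 1:
--                 answer[1] += 1
--             if tr[1] == 1:
--                 answer[0] += 1
--
--     return answer
-- ===== SOURCE B (Python) =====
-- def solution(nodes, edges):
--     adj = {}
--     for a, b in edges:
--         adj.setdefault(a, []).append(b)
--         adj.setdefault(b, []).append(a)
--     answer = [0, 0]
--     # pass 1: every occurrence of a degree-0 node contributes by its own parity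
--     for node in nodes:
--         if node not in adj:
--             if node % 2 == 0:
--                 answer[0] += 1
--             else:
--                 answer[1] += 1
--     # pass 2: each positive-degree component, found once by an explicit-stack DFS
--     seen = set()
--     for node in nodes:
--         if node in adj and node not in seen:
--             seen.add(node)
--             stack = [node]
--             comp = []
--             while stack:
--                 x = stack.pop()
--                 comp.append(x)
--                 for y in adj[x]:
--                     if y not in seen:
--                         seen.add(y)
--                         stack.append(y)
--             tr0 = sum(1 for x in comp if (x + len(adj[x])) % 2 == 1)
--             if tr0 == 1:
--                 answer[1] += 1
--             if len(comp) - tr0 == 1: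
--                 answer[0] += 1
--     return answer
-- ===== Notes on version B (the rewrite author's own statement) =====
-- stated objective: alternative
-- what changed: Replaces A's recursive DFS closure (which mutates shared visited/tr state and special-cases isolated nodes inside one stateful loop) by two flat passes: an arithmetic tally of degree-0 occurrences, then an explicit-stack iterative DFS that collects each positive-degree component as a list and classifies it with the single parity test (x + deg x) % 2 instead of A's four-way parity case split.
import Mathlib
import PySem

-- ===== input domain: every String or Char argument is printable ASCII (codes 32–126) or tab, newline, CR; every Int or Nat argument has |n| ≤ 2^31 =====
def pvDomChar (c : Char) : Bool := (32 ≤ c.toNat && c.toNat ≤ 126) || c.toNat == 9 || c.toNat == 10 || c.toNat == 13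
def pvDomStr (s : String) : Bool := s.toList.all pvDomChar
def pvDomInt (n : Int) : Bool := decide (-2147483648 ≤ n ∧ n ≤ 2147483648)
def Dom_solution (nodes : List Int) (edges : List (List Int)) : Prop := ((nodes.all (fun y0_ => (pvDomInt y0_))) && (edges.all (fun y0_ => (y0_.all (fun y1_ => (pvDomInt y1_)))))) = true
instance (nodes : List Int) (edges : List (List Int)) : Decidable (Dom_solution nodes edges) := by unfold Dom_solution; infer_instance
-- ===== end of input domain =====

-- B replaces A's recursive DFS (with its separate isolated-node branch inside one stateful loop) by two flat
-- passes: an arithmetic tally of degree-0 occurrences, then an explicit-stack DFS per positive-degree component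
-- classified by the single parity test (x + deg x) % 2; objective: alternative (same asymptotic cost).

-- ===== PORT A =====
-- e = defaultdict(list); for a, b in edges: e[a].append(b); e[b].append(a)
def solBuildE (edges : List (List Int)) : PySem.Dict Int (List Int) :=
  edges.foldl (fun d ed =>
    match ed with
    | [a, b] => (d.modify a [] (· ++ [b])).modify b [] (· ++ [a])
    | _ => d) PySem.Dict.empty

-- visited = {i: False for i in nodes}
def solVisited0 (nodes : List Int) : PySem.Dict Int Bool :=
  nodes.foldl (fun d i => d.insert i false) PySem.Dict.empty

-- the recursive helper check(n); fuel only makes the recursion structural (never exhausted under Pre_,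
-- each call marks a fresh key of visited); missing visited keys read as True (Python raises there: outside Pre_)
def solCheck (adj : PySem.Dict Int (List Int)) : Nat → PySem.Dict Int Bool → Int × Int → Int → PySem.Dict Int Bool × (Int × Int)
  | 0, v, tr, _ => (v, tr)
  | fuel+1, v, tr, n =>
    let v1 := v.insert n true
    let deg : Int := ((adj.getD n []).length : Int)
    let tr1 := if (PySem.Int.mod n 2 == 1 && PySem.Int.mod deg 2 == 0)
                  || (PySem.Int.mod n 2 == 0 && PySem.Int.mod deg 2 == 1)
               then (tr.1 + 1, tr.2) else (tr.1, tr.2 + 1)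
    (adj.getD n []).foldl
      (fun st m => if st.1.getD m true then st else solCheck adj fuel st.1 st.2 m) (v1, tr1)

-- body of the loop 'for node in nodes'
def solStepA (adj : PySem.Dict Int (List Int)) (fuel : Nat)
    (st : (Int × Int) × PySem.Dict Int Bool) (node : Int) : (Int × Int) × PySem.Dict Int Bool :=
  if st.2.getD node true then st
  else if ((adj.getD node []).length : Int) == 0 then
    (if PySem.Int.mod node 2 == 0 then ((st.1.1 + 1, st.1.2), st.2) else ((st.1.1, st.1.2 + 1), st.2))
  else
    let r := solCheck adj fuel st.2 (0, 0) node
    ((st.1.1 + (if r.2.2 == 1 then 1 else 0), st.1.2 + (if r.2.1 == 1 then 1 else 0)), r.1)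

def solution (nodes : List Int) (edges : List (List Int)) : List Int :=
  let e := solBuildE edges
  let st := nodes.foldl (solStepA e (nodes.length + 1)) ((0, 0), solVisited0 nodes)
  [st.1.1, st.1.2]

-- ===== PORT B =====
-- adj = {}; for a, b in edges: adj.setdefault(a, []).append(b); adj.setdefault(b, []).append(a)
def solAdjB (edges : List (List Int)) : PySem.Dict Int (List Int) :=
  edges.foldl (fun d ed =>
    match ed with
    | [a, b] => (d.modify a [] (· ++ [b])).modify b [] (· ++ [a])
    | _ => d) PySem.Dict.empty

-- pass 1 body: every occurrence of a degree-0 node contributes by its own parity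
def solIso (adj : PySem.Dict Int (List Int)) (ans : Int × Int) (node : Int) : Int × Int :=
  if adj.contains node then ans
  else if PySem.Int.mod node 2 == 0 then (ans.1 + 1, ans.2) else (ans.1, ans.2 + 1)

-- the while-loop over the explicit stack (fuel = structural recursion bound, never exhausted: each
-- push is of a newly seen node)
def solDfs (adj : PySem.Dict Int (List Int)) :
    Nat → List Int → List Int → PySem.Set Int → List Int × PySem.Set Int
  | 0, _, comp, seen => (comp, seen)
  | fuel+1, stack, comp, seen =>
    match stack with
    | [] => (comp, seen)
    | x :: rest =>
      let comp1 := comp ++ [x]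
      let p := (adj.getD x []).foldl
        (fun (p : List Int × PySem.Set Int) y =>
          if p.2.contains y then p else (y :: p.1, p.2.add y)) (rest, seen)
      solDfs adj fuel p.1 comp1 p.2

-- pass 2 body: one component per first unseen positive-degree node
def solStepB (adj : PySem.Dict Int (List Int)) (fuel : Nat)
    (st : (Int × Int) × PySem.Set Int) (node : Int) : (Int × Int) × PySem.Set Int :=
  if adj.contains node && !(st.2.contains node) then
    let r := solDfs adj fuel [node] [] (st.2.add node)
    let tr0 : Int := ((r.1.countP (fun x => PySem.Int.mod (x + ((adj.getD x []).length : Int)) 2 == 1) : Nat) : Int)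
    ((st.1.1 + (if ((r.1.length : Int) - tr0) == 1 then 1 else 0),
      st.1.2 + (if tr0 == 1 then 1 else 0)), r.2)
  else st

def solution_alt (nodes : List Int) (edges : List (List Int)) : List Int :=
  let adj := solAdjB edges
  let a1 := nodes.foldl (solIso adj) (0, 0)
  let st := nodes.foldl (solStepB adj (nodes.length + 1)) (a1, PySem.Set.empty)
  [st.1.1, st.1.2]

-- ===== PRECONDITION & SPEC =====
-- Pre_ excludes exactly the inputs where A raises: an edge that is not a pair (ValueError on unpacking),
-- or an edge with exactly one endpoint in nodes (its in-nodes endpoint is traversed and visited[other]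
-- raises KeyError).  A returns normally on every other input.
def Pre_solution (nodes : List Int) (edges : List (List Int)) : Prop :=
  ∀ ed ∈ edges, ed.length = 2 ∧ ((ed.getD 0 0 ∈ nodes) ↔ (ed.getD 1 0 ∈ nodes))
instance (nodes : List Int) (edges : List (List Int)) : Decidable (Pre_solution nodes edges) := by
  unfold Pre_solution; infer_instance
def pvWitness_solution : List Int × List (List Int) := ([1, 2, 3], [[1, 2]])

def Spec_solution (nodes : List Int) (edges : List (List Int)) (out : List Int) : Prop := out = solution_alt nodes edges
instance (nodes : List Int) (edges : List (List Int)) (out : List Int) : Decidable (Spec_solution nodes edges out) := by unfold Spec_solution; infer_instance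

-- ===== CLAIM (what is proved, stated in full; the proofs are below) =====
def Claim_equal_solution : Prop := ∀ (nodes : List Int) (edges : List (List Int)), Dom_solution nodes edges → Pre_solution nodes edges → Spec_solution nodes edges (solution nodes edges)

-- ===== LEMMAS AND PROOFS =====

-- ---------- proof-side abbreviations ----------
def Nbr (adj : PySem.Dict Int (List Int)) (x : Int) : List Int := adj.getD x []

def ReachA (adj : PySem.Dict Int (List Int)) : Int → Int → Prop :=
  Relation.ReflTransGen (fun u v => v ∈ Nbr adj u)

def bkt (adj : PySem.Dict Int (List Int)) (x : Int) : Bool :=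
  PySem.Int.mod (x + ((Nbr adj x).length : Int)) 2 == 1

def PhiA (nodes : List Int) (v : PySem.Dict Int Bool) : Nat :=
  (nodes.toFinset.filter (fun x => v.getD x true = false)).card

def PsiB (nodes : List Int) (seen : List Int) : Nat :=
  (nodes.toFinset.filter (fun x => x ∉ seen)).card

-- A's classification condition is the single parity test used by B
lemma bkt_cond (adj : PySem.Dict Int (List Int)) (n : Int) :
    ((PySem.Int.mod n 2 == 1 && PySem.Int.mod (((adj.getD n []).length : Int)) 2 == 0)
      || (PySem.Int.mod n 2 == 0 && PySem.Int.mod (((adj.getD n []).length : Int)) 2 == 1))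
      = bkt adj n := by
  simp only [bkt, Nbr]
  rw [PySem.Int.mod_eq_emod_of_pos (by norm_num), PySem.Int.mod_eq_emod_of_pos (by norm_num),
      PySem.Int.mod_eq_emod_of_pos (by norm_num)]
  rcases Int.emod_two_eq n with h | h <;>
    rcases Int.emod_two_eq ((adj.getD n []).length : Int) with h' | h' <;>
      simp [h, h', Int.add_emod]

-- generic invariant for the adjacency-building fold (both ports build the same dict)
lemma build_inv (edges : List (List Int)) (P : PySem.Dict Int (List Int) → Prop)
    (C : Int → Int → Prop)
    (hedges : ∀ ed ∈ edges, ∀ a b : Int, ed = [a, b] → C a b)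
    (h0 : P PySem.Dict.empty)
    (hstep : ∀ d a b, C a b → P d → P ((d.modify a [] (· ++ [b])).modify b [] (· ++ [a]))) :
    P (solBuildE edges) := by
  have aux : ∀ (l : List (List Int)) (d : PySem.Dict Int (List Int)),
      (∀ ed ∈ l, ∀ a b : Int, ed = [a, b] → C a b) → P d →
      P (l.foldl (fun d ed => match ed with
          | [a, b] => (d.modify a [] (· ++ [b])).modify b [] (· ++ [a])
          | _ => d) d) := by
    intro l
    induction l with
    | nil => intro d _ hd; simpa using hd
    | cons ed t ih =>
      intro d hl hd
      simp only [List.foldl_cons]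
      rcases ed with _ | ⟨a, ed⟩
      · exact ih d (fun e he => hl e (by simp [he])) hd
      rcases ed with _ | ⟨b, ed⟩
      · exact ih _ (fun e he => hl e (by simp [he])) hd
      rcases ed with _ | ⟨e0, ed⟩
      · exact ih _ (fun e he => hl e (by simp [he]))
          (hstep d a b (hl [a, b] (by simp) a b rfl) hd)
      · exact ih _ (fun e he => hl e (by simp [he])) hd
  exact aux edges PySem.Dict.empty hedges h0

lemma getD_modify2 (d : PySem.Dict Int (List Int)) (a b x : Int) :
    ((d.modify a [] (· ++ [b])).modify b [] (· ++ [a])).getD x [] =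
      if x = b then (if b = a then d.getD a [] ++ [b] else d.getD b []) ++ [a]
      else if x = a then d.getD a [] ++ [b] else d.getD x [] := by
  simp only [PySem.Dict.getD_modify]

-- neighbours stay on the same side of `nodes` (uses Pre_)
lemma adj_nodes (nodes : List Int) (edges : List (List Int))
    (hpre : Pre_solution nodes edges) :
    ∀ x y, y ∈ Nbr (solBuildE edges) x → (x ∈ nodes ↔ y ∈ nodes) := by
  simp only [Nbr]
  refine build_inv edges
    (fun d => ∀ x y, y ∈ d.getD x [] → (x ∈ nodes ↔ y ∈ nodes))
    (fun a b => (a ∈ nodes ↔ b ∈ nodes))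
    (fun ed hed a b hab => by
      have h2 := (hpre ed hed).2
      subst hab
      simpa using h2)
    (by intro x y hy; rw [PySem.Dict.getD_empty] at hy; simp at hy)
    ?_
  intro d a b hC hP x y hy
  rw [getD_modify2] at hy
  by_cases h1 : x = b
  · rw [if_pos h1] at hy
    rcases List.mem_append.mp hy with hy | hy
    · by_cases hba : b = a
      · rw [if_pos hba] at hy
        rcases List.mem_append.mp hy with hy | hy
        · rw [h1, hba]; exact hP a y hy
        · simp at hy; rw [h1, hba, hy]; exact hC
      · rw [if_neg hba] at hy
        rw [h1]; exact hP b y hy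
    · simp at hy; rw [h1, hy]; exact hC.symm
  · rw [if_neg h1] at hy
    by_cases h2 : x = a
    · rw [if_pos h2] at hy
      rcases List.mem_append.mp hy with hy | hy
      · rw [h2]; exact hP a y hy
      · simp at hy; rw [h2, hy]; exact hC
    · rw [if_neg h2] at hy
      exact hP x y hy

-- a key of the adjacency dict has a nonempty neighbour list
lemma adj_deg (edges : List (List Int)) :
    ∀ x, (solBuildE edges).contains x = true → Nbr (solBuildE edges) x ≠ [] := by
  simp only [Nbr]
  refine build_inv edges
    (fun d => ∀ x, d.contains x = true → d.getD x [] ≠ []) (fun _ _ => True)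
    (fun _ _ _ _ _ => trivial)
    (by intro x hx; rw [PySem.Dict.contains_empty] at hx; simp at hx)
    ?_
  intro d a b _ hP x hx
  rw [PySem.Dict.contains_modify, PySem.Dict.contains_modify] at hx
  rw [getD_modify2]
  by_cases h1 : x = b
  · rw [if_pos h1]; simp
  · rw [if_neg h1]
    by_cases h2 : x = a
    · rw [if_pos h2]; simp
    · rw [if_neg h2]
      apply hP x
      simpa [h1, h2] using hx

-- adjacency membership is symmetric (each edge is recorded in both directions)
lemma adj_sym (edges : List (List Int)) :
    ∀ x y, y ∈ Nbr (solBuildE edges) x → x ∈ Nbr (solBuildE edges) y := by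
  simp only [Nbr]
  refine build_inv edges
    (fun d => ∀ x y, y ∈ d.getD x [] → x ∈ d.getD y []) (fun _ _ => True)
    (fun _ _ _ _ _ => trivial)
    (by intro x y hy; rw [PySem.Dict.getD_empty] at hy; simp at hy)
    ?_
  intro d a b _ hP x y hy
  rw [getD_modify2] at hy
  rw [getD_modify2]
  by_cases h1 : x = b <;> by_cases h2 : x = a <;> by_cases h3 : y = b <;> by_cases h4 : y = a <;>
    by_cases h5 : b = a <;>
      simp_all [List.mem_append]

lemma visited0_getD (nodes : List Int) (x : Int) :
    (solVisited0 nodes).getD x true = if x ∈ nodes then false else true := by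
  have aux : ∀ (l : List Int) (d : PySem.Dict Int Bool),
      (l.foldl (fun d i => d.insert i false) d).getD x true
        = if x ∈ l then false else d.getD x true := by
    intro l
    induction l with
    | nil => intro d; simp
    | cons i t ih =>
      intro d
      simp only [List.foldl_cons]
      rw [ih (d.insert i false), PySem.Dict.getD_insert]
      by_cases h1 : x ∈ t <;> by_cases h2 : x = i <;> simp [h1, h2]
  rw [solVisited0, aux, PySem.Dict.getD_empty]

lemma visited0_contains (nodes : List Int) (x : Int) :
    (solVisited0 nodes).contains x = decide (x ∈ nodes) := by
  have aux : ∀ (l : List Int) (d : PySem.Dict Int Bool),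
      (l.foldl (fun d i => d.insert i false) d).contains x
        = (decide (x ∈ l) || d.contains x) := by
    intro l
    induction l with
    | nil => intro d; simp
    | cons i t ih =>
      intro d
      simp only [List.foldl_cons]
      rw [ih (d.insert i false), PySem.Dict.contains_insert]
      by_cases h1 : x ∈ t <;> by_cases h2 : x = i <;> simp [h1, h2]
  rw [solVisited0, aux, PySem.Dict.contains_empty]
  simp

lemma phi_mono (nodes : List Int) {v w : PySem.Dict Int Bool}
    (h : ∀ x, v.getD x true = true → w.getD x true = true) :
    PhiA nodes w ≤ PhiA nodes v := by
  apply Finset.card_le_card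
  intro x hx
  simp only [Finset.mem_filter] at hx ⊢
  refine ⟨hx.1, ?_⟩
  cases hv : v.getD x true with
  | false => rfl
  | true =>
    have hw := h x hv
    rw [hx.2] at hw
    exact absurd hw (by simp)

lemma phi_dec (nodes : List Int) (v : PySem.Dict Int Bool) (n : Int)
    (hn : n ∈ nodes) (hf : v.getD n true = false) :
    PhiA nodes (v.insert n true) < PhiA nodes v := by
  apply Finset.card_lt_card
  rw [Finset.ssubset_iff_of_subset]
  · exact ⟨n, by simp [List.mem_toFinset, hn, hf], by simp [PySem.Dict.getD_insert]⟩
  · intro x hx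
    simp only [Finset.mem_filter] at hx ⊢
    refine ⟨hx.1, ?_⟩
    have h2 := hx.2
    rw [PySem.Dict.getD_insert] at h2
    by_cases hxn : x = n
    · rw [if_pos hxn] at h2; exact absurd h2 (by simp)
    · rwa [if_neg hxn] at h2

lemma psi_eq_phi (nodes : List Int) (v : PySem.Dict Int Bool) (seen : List Int)
    (hsync : ∀ x ∈ nodes, (v.getD x true = true ↔ x ∈ seen)) :
    PsiB nodes seen = PhiA nodes v := by
  unfold PsiB PhiA
  congr 1
  apply Finset.filter_congr
  intro x hx
  simp only [List.mem_toFinset] at hx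
  have h := hsync x hx
  constructor
  · intro hns
    cases hv : v.getD x true with
    | false => rfl
    | true => exact absurd (h.mp hv) hns
  · intro hv hsn
    have := h.mpr hsn
    rw [hv] at this
    exact absurd this (by simp)

lemma psi_add_lt (nodes : List Int) (seen : PySem.Set Int) (n : Int)
    (hn : n ∈ nodes) (hns : n ∉ seen) :
    PsiB nodes (seen.add n) < PsiB nodes seen := by
  apply Finset.card_lt_card
  rw [Finset.ssubset_iff_of_subset]
  · refine ⟨n, by simp [List.mem_toFinset, hn, hns], ?_⟩
    simp only [Finset.mem_filter, not_and, List.mem_toFinset]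
    intro _ h
    exact h ((PySem.Set.mem_add seen n n).mpr (Or.inr rfl))
  · intro x hx
    simp only [Finset.mem_filter] at hx ⊢
    exact ⟨hx.1, fun h => hx.2 ((PySem.Set.mem_add seen n x).mpr (Or.inl h))⟩

lemma psi_push (nodes : List Int) (sn sn' : List Int) (P : List Int)
    (hP : P.Nodup) (hPn : ∀ y ∈ P, y ∈ nodes) (hPs : ∀ y ∈ P, y ∉ sn)
    (hsn' : ∀ x, x ∈ sn' ↔ x ∈ sn ∨ x ∈ P) :
    PsiB nodes sn' + P.length ≤ PsiB nodes sn := by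
  unfold PsiB
  have hPcard : P.toFinset.card = P.length := List.toFinset_card_of_nodup hP
  have hdisj : Disjoint (nodes.toFinset.filter (fun x => x ∉ sn')) P.toFinset := by
    rw [Finset.disjoint_right]
    intro a ha hmem
    simp only [List.mem_toFinset] at ha
    simp only [Finset.mem_filter] at hmem
    exact hmem.2 ((hsn' a).mpr (Or.inr ha))
  have hsub : (nodes.toFinset.filter (fun x => x ∉ sn')) ∪ P.toFinset
      ⊆ nodes.toFinset.filter (fun x => x ∉ sn) := by
    intro a ha
    rcases Finset.mem_union.mp ha with ha | ha
    · simp only [Finset.mem_filter] at ha ⊢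
      exact ⟨ha.1, fun h => ha.2 ((hsn' a).mpr (Or.inl h))⟩
    · simp only [List.mem_toFinset] at ha
      simp only [Finset.mem_filter, List.mem_toFinset]
      exact ⟨hPn a ha, hPs a ha⟩
  have hle := Finset.card_le_card hsub
  rw [Finset.card_union_of_disjoint hdisj] at hle
  omega

lemma reach_nodes (nodes : List Int) (adj : PySem.Dict Int (List Int))
    (hQ : ∀ x y, y ∈ Nbr adj x → (x ∈ nodes ↔ y ∈ nodes))
    {n x : Int} (hn : n ∈ nodes) (h : ReachA adj n x) : x ∈ nodes := by
  induction h with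
  | refl => exact hn
  | tail _ h2 ih => exact (hQ _ _ h2).mp ih

-- a component list is determined by reachability and the already-processed closed set
lemma comp_unique (adj : PySem.Dict Int (List Int)) (S : Int → Prop)
    (hS : ∀ x y, S x → y ∈ Nbr adj x → S y) (n : Int) (L : List Int)
    (hnL : n ∈ L) (hsound : ∀ x ∈ L, ReachA adj n x ∧ ¬ S x)
    (hcomp : ∀ x ∈ L, ∀ y ∈ Nbr adj x, y ∈ L ∨ S y) :
    ∀ x, x ∈ L ↔ (ReachA adj n x ∧ ¬ S x) := by
  have aux : ∀ x, ReachA adj n x → ¬ S x → x ∈ L := by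
    intro x hr
    induction hr with
    | refl => exact fun _ => hnL
    | @tail u y _ h2 ih =>
      intro hy
      have hu : u ∈ L := ih (fun hSu => hy (hS u y hSu h2))
      rcases hcomp u hu y h2 with h | h
      · exact h
      · exact absurd h hy
  intro x
  exact ⟨fun hx => hsound x hx, fun h => aux x h.1 h.2⟩

-- ---------- the recursive DFS of A ----------
def CheckPred (nodes : List Int) (adj : PySem.Dict Int (List Int)) (fuel : Nat) : Prop :=
  ∀ (v : PySem.Dict Int Bool) (tr : Int × Int) (n : Int),
    n ∈ nodes → v.getD n true = false →
    (∀ x, v.contains x = decide (x ∈ nodes)) →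
    PhiA nodes v < fuel →
    ∃ L : List Int, L.Nodup ∧ n ∈ L ∧
      (∀ x ∈ L, x ∈ nodes ∧ v.getD x true = false ∧ ReachA adj n x) ∧
      (∀ x, (solCheck adj fuel v tr n).1.getD x true = if x ∈ L then true else v.getD x true) ∧
      (∀ x, (solCheck adj fuel v tr n).1.contains x = v.contains x) ∧
      (∀ x ∈ L, ∀ y ∈ Nbr adj x, (solCheck adj fuel v tr n).1.getD y true = true) ∧
      (solCheck adj fuel v tr n).2
        = (tr.1 + ((L.countP (bkt adj) : Nat) : Int), tr.2 + ((L.countP (fun x => !(bkt adj x)) : Nat) : Int))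

lemma foldA_spec (nodes : List Int) (adj : PySem.Dict Int (List Int)) (fuel : Nat)
    (hIH : CheckPred nodes adj fuel) :
    ∀ (ms : List Int) (v : PySem.Dict Int Bool) (tr : Int × Int),
    (∀ m ∈ ms, m ∈ nodes) →
    (∀ x, v.contains x = decide (x ∈ nodes)) →
    PhiA nodes v < fuel →
    ∃ L : List Int, L.Nodup ∧
      (∀ x ∈ L, x ∈ nodes ∧ v.getD x true = false ∧ ∃ m ∈ ms, ReachA adj m x) ∧
      (∀ x, (ms.foldl (fun st m => if st.1.getD m true then st else solCheck adj fuel st.1 st.2 m) (v, tr)).1.getD x true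
          = if x ∈ L then true else v.getD x true) ∧
      (∀ x, (ms.foldl (fun st m => if st.1.getD m true then st else solCheck adj fuel st.1 st.2 m) (v, tr)).1.contains x = v.contains x) ∧
      (∀ m ∈ ms, (ms.foldl (fun st m => if st.1.getD m true then st else solCheck adj fuel st.1 st.2 m) (v, tr)).1.getD m true = true) ∧
      (∀ x ∈ L, ∀ y ∈ Nbr adj x,
        (ms.foldl (fun st m => if st.1.getD m true then st else solCheck adj fuel st.1 st.2 m) (v, tr)).1.getD y true = true) ∧
      (ms.foldl (fun st m => if st.1.getD m true then st else solCheck adj fuel st.1 st.2 m) (v, tr)).2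
        = (tr.1 + ((L.countP (bkt adj) : Nat) : Int), tr.2 + ((L.countP (fun x => !(bkt adj x)) : Nat) : Int)) := by
  intro ms
  induction ms with
  | nil =>
    intro v tr hms hkeys hφ
    exact ⟨[], by simp, by simp, by simp, by simp, by simp, by simp, by simp⟩
  | cons m ms ih =>
    intro v tr hms hkeys hφ
    simp only [List.foldl_cons]
    by_cases hm : v.getD m true = true
    · rw [if_pos hm]
      obtain ⟨L, hnd, hsound, hdesc, hcont, hmark, hcomp, hcnt⟩ :=
        ih v tr (fun x hx => hms x (List.mem_cons_of_mem _ hx)) hkeys hφ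
      refine ⟨L, hnd, ?_, hdesc, hcont, ?_, hcomp, hcnt⟩
      · intro x hx
        obtain ⟨h1, h2, mq, hmq, h3⟩ := hsound x hx
        exact ⟨h1, h2, mq, List.mem_cons_of_mem _ hmq, h3⟩
      · intro m' hm'
        rcases List.mem_cons.mp hm' with h | h
        · subst h
          rw [hdesc m']
          by_cases hL : m' ∈ L
          · rw [if_pos hL]
          · rw [if_neg hL]; exact hm
        · exact hmark m' h
    · have hmf : v.getD m true = false := by
        cases h : v.getD m true
        · rfl
        · exact absurd h hm
      rw [if_neg hm]
      obtain ⟨L₁, hnd₁, hn₁, hsound₁, hdesc₁, hcont₁, hcomp₁, hcnt₁⟩ :=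
        hIH v tr m (hms m (by simp)) hmf hkeys hφ
      have hmono₁ : ∀ x, v.getD x true = true → (solCheck adj fuel v tr m).1.getD x true = true := by
        intro x hx; rw [hdesc₁ x]; by_cases h : x ∈ L₁ <;> simp [h, hx]
      obtain ⟨L₂, hnd₂, hsound₂, hdesc₂, hcont₂, hmark₂, hcomp₂, hcnt₂⟩ :=
        ih (solCheck adj fuel v tr m).1 (solCheck adj fuel v tr m).2
          (fun x hx => hms x (List.mem_cons_of_mem _ hx))
          (fun x => (hcont₁ x).trans (hkeys x))
          (lt_of_le_of_lt (phi_mono nodes hmono₁) hφ)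
      have hdisj : ∀ x ∈ L₂, x ∉ L₁ := by
        intro x hx hx1
        have h2 := (hsound₂ x hx).2.1
        rw [hdesc₁ x, if_pos hx1] at h2
        exact absurd h2 (by simp)
      refine ⟨L₁ ++ L₂, ?_, ?_, ?_, ?_, ?_, ?_, ?_⟩
      · exact List.Nodup.append hnd₁ hnd₂ (fun a ha1 ha2 => hdisj a ha2 ha1)
      · intro x hx
        rcases List.mem_append.mp hx with hx | hx
        · obtain ⟨h1, h2, h3⟩ := hsound₁ x hx
          exact ⟨h1, h2, m, by simp, h3⟩
        · obtain ⟨h1, h2, mq, hmq, h3⟩ := hsound₂ x hx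
          refine ⟨h1, ?_, mq, List.mem_cons_of_mem _ hmq, h3⟩
          rw [hdesc₁ x] at h2
          by_cases hL : x ∈ L₁
          · rw [if_pos hL] at h2; exact absurd h2 (by simp)
          · rwa [if_neg hL] at h2
      · intro x
        rw [hdesc₂ x, hdesc₁ x]
        by_cases h1 : x ∈ L₁ <;> by_cases h2 : x ∈ L₂ <;>
          simp [h1, h2, List.mem_append]
      · intro x; rw [hcont₂ x, hcont₁ x]
      · intro m' hm'
        rcases List.mem_cons.mp hm' with h | h
        · subst h
          rw [hdesc₂ m']
          by_cases hL : m' ∈ L₂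
          · rw [if_pos hL]
          · rw [if_neg hL, hdesc₁ m', if_pos hn₁]
        · exact hmark₂ m' h
      · intro x hx y hy
        rcases List.mem_append.mp hx with hx | hx
        · have h := hcomp₁ x hx y hy
          rw [hdesc₂ y]
          by_cases hL : y ∈ L₂
          · rw [if_pos hL]
          · rw [if_neg hL]; exact h
        · exact hcomp₂ x hx y hy
      · rw [hcnt₂, hcnt₁]
        simp only [List.countP_append]
        push_cast
        exact Prod.ext (by ring) (by ring)

lemma checkA_spec (nodes : List Int) (adj : PySem.Dict Int (List Int))
    (hQ : ∀ x y, y ∈ Nbr adj x → (x ∈ nodes ↔ y ∈ nodes)) :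
    ∀ fuel, CheckPred nodes adj fuel := by
  intro fuel
  induction fuel with
  | zero =>
    intro v tr n _ _ _ hφ
    exact absurd hφ (Nat.not_lt_zero _)
  | succ fuel ih =>
    intro v tr n hn hf hkeys hφ
    have hred : solCheck adj (fuel + 1) v tr n
        = (adj.getD n []).foldl
            (fun st m => if st.1.getD m true then st else solCheck adj fuel st.1 st.2 m)
            (v.insert n true,
             if (PySem.Int.mod n 2 == 1 && PySem.Int.mod (((adj.getD n []).length : Int)) 2 == 0)
                || (PySem.Int.mod n 2 == 0 && PySem.Int.mod (((adj.getD n []).length : Int)) 2 == 1)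
             then (tr.1 + 1, tr.2) else (tr.1, tr.2 + 1)) := rfl
    have hkeys1 : ∀ x, (v.insert n true).contains x = decide (x ∈ nodes) := by
      intro x
      rw [PySem.Dict.contains_insert]
      by_cases hx : x = n
      · subst hx; simp [hn]
      · simp [hx, hkeys x]
    have hφ1 : PhiA nodes (v.insert n true) < fuel := by
      have := phi_dec nodes v n hn hf; omega
    obtain ⟨L', hnd', hsound', hdesc', hcont', hmark', hcomp', hcnt'⟩ :=
      foldA_spec nodes adj fuel ih (adj.getD n []) (v.insert n true)
        (if (PySem.Int.mod n 2 == 1 && PySem.Int.mod (((adj.getD n []).length : Int)) 2 == 0)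
            || (PySem.Int.mod n 2 == 0 && PySem.Int.mod (((adj.getD n []).length : Int)) 2 == 1)
         then (tr.1 + 1, tr.2) else (tr.1, tr.2 + 1))
        (fun m hm => (hQ n m hm).mp hn) hkeys1 hφ1
    have hnL' : n ∉ L' := by
      intro h
      have h2 := (hsound' n h).2.1
      rw [PySem.Dict.getD_insert, if_pos rfl] at h2
      exact absurd h2 (by simp)
    rw [hred]
    refine ⟨n :: L', List.nodup_cons.mpr ⟨hnL', hnd'⟩, by simp, ?_, ?_, ?_, ?_, ?_⟩
    · intro x hx
      rcases List.mem_cons.mp hx with h | h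
      · subst h; exact ⟨hn, hf, Relation.ReflTransGen.refl⟩
      · obtain ⟨h1, h2, mq, hmq, h3⟩ := hsound' x h
        rw [PySem.Dict.getD_insert] at h2
        by_cases hxn : x = n
        · rw [if_pos hxn] at h2; exact absurd h2 (by simp)
        · rw [if_neg hxn] at h2
          exact ⟨h1, h2, Relation.ReflTransGen.head hmq h3⟩
    · intro x
      rw [hdesc' x, PySem.Dict.getD_insert]
      by_cases hx2 : x ∈ L' <;> by_cases hx1 : x = n <;> simp [hx1, hx2]
    · intro x
      rw [hcont' x, PySem.Dict.contains_insert]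
      by_cases hx : x = n
      · subst hx; simp [hkeys x, hn]
      · simp [hx]
    · intro x hx y hy
      rcases List.mem_cons.mp hx with h | h
      · subst h; exact hmark' y hy
      · exact hcomp' x h y hy
    · rw [hcnt', List.countP_cons, List.countP_cons, bkt_cond adj n]
      cases hb : bkt adj n <;>
        · simp only [hb, Bool.not_true, Bool.not_false, Bool.false_eq_true, if_true, if_false]
          push_cast
          refine Prod.ext ?_ ?_ <;> dsimp only <;> ring

-- ---------- the explicit-stack DFS of B ----------
lemma push_spec (adj : PySem.Dict Int (List Int)) :
    ∀ (ms : List Int) (st : List Int) (sn : PySem.Set Int),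
    ∃ P : List Int, P.Nodup ∧ (∀ y ∈ P, y ∈ ms ∧ y ∉ sn) ∧
      (ms.foldl (fun (p : List Int × PySem.Set Int) y =>
          if p.2.contains y then p else (y :: p.1, p.2.add y)) (st, sn)).1 = P ++ st ∧
      (∀ x, x ∈ (ms.foldl (fun (p : List Int × PySem.Set Int) y =>
          if p.2.contains y then p else (y :: p.1, p.2.add y)) (st, sn)).2 ↔ x ∈ sn ∨ x ∈ P) ∧
      (∀ m ∈ ms, m ∈ (ms.foldl (fun (p : List Int × PySem.Set Int) y =>
          if p.2.contains y then p else (y :: p.1, p.2.add y)) (st, sn)).2) := by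
  intro ms
  induction ms with
  | nil =>
    intro st sn
    exact ⟨[], by simp, by simp, by simp, by simp, by simp⟩
  | cons y ms ih =>
    intro st sn
    simp only [List.foldl_cons]
    by_cases hy : y ∈ sn
    · have hc : sn.contains y = true := by
        simpa using hy
      rw [if_pos hc]
      obtain ⟨P, hnd, hmem, hst, hsn, hms⟩ := ih st sn
      refine ⟨P, hnd, fun z hz => ⟨List.mem_cons_of_mem _ (hmem z hz).1, (hmem z hz).2⟩,
        hst, hsn, ?_⟩
      intro m hm
      rcases List.mem_cons.mp hm with hm | hm
      · subst hm; exact (hsn m).mpr (Or.inl hy)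
      · exact hms m hm
    · have hcond : ¬ (sn.contains y = true) := by
        simpa using hy
      rw [if_neg hcond]
      obtain ⟨P, hnd, hmem, hst, hsn, hms⟩ := ih (y :: st) (sn.add y)
      have hyP : y ∉ P := fun h =>
        (hmem y h).2 ((PySem.Set.mem_add sn y y).mpr (Or.inr rfl))
      refine ⟨P ++ [y], ?_, ?_, ?_, ?_, ?_⟩
      · rw [List.nodup_append]
        refine ⟨hnd, List.nodup_singleton y, ?_⟩
        intro a ha b hb h
        rw [List.mem_singleton] at hb
        subst hb; subst h
        exact hyP ha
      · intro z hz
        rcases List.mem_append.mp hz with hz | hz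
        · refine ⟨List.mem_cons_of_mem _ (hmem z hz).1, fun hzs => (hmem z hz).2 ?_⟩
          exact (PySem.Set.mem_add sn y z).mpr (Or.inl hzs)
        · simp only [List.mem_singleton] at hz; subst hz
          exact ⟨by simp, hy⟩
      · rw [hst, List.append_assoc]
        rfl
      · intro x
        rw [hsn x, PySem.Set.mem_add]
        simp only [List.mem_append, List.mem_singleton]
        tauto
      · intro m hm
        rcases List.mem_cons.mp hm with hm | hm
        · subst hm
          exact (hsn m).mpr (Or.inl ((PySem.Set.mem_add sn m m).mpr (Or.inr rfl)))
        · exact hms m hm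

lemma dfs_spec (nodes : List Int) (adj : PySem.Dict Int (List Int))
    (hQ : ∀ x y, y ∈ Nbr adj x → (x ∈ nodes ↔ y ∈ nodes)) (S : Int → Prop) (n0 : Int) :
    ∀ (fuel : Nat) (stack comp : List Int) (seen : PySem.Set Int),
    (∀ x ∈ stack, x ∈ seen) → stack.Nodup → comp.Nodup →
    (∀ x ∈ comp, x ∉ stack) →
    (∀ x, x ∈ seen ↔ S x ∨ x ∈ comp ∨ x ∈ stack) →
    (∀ x ∈ comp, ∀ y ∈ Nbr adj x, y ∈ seen) →
    (∀ x, x ∈ stack ∨ x ∈ comp → ReachA adj n0 x) →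
    (∀ x, x ∈ stack ∨ x ∈ comp → x ∈ nodes) →
    (∀ x, x ∈ stack ∨ x ∈ comp → ¬ S x) →
    PsiB nodes seen + stack.length < fuel →
    (solDfs adj fuel stack comp seen).1.Nodup ∧
    (∀ x, x ∈ stack ∨ x ∈ comp → x ∈ (solDfs adj fuel stack comp seen).1) ∧
    (∀ x ∈ (solDfs adj fuel stack comp seen).1, ReachA adj n0 x ∧ x ∈ nodes ∧ ¬ S x) ∧
    (∀ x, x ∈ (solDfs adj fuel stack comp seen).2 ↔ S x ∨ x ∈ (solDfs adj fuel stack comp seen).1) ∧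
    (∀ x ∈ (solDfs adj fuel stack comp seen).1, ∀ y ∈ Nbr adj x, y ∈ (solDfs adj fuel stack comp seen).2) := by
  intro fuel
  induction fuel with
  | zero =>
    intro stack comp seen _ _ _ _ _ _ _ _ _ hψ
    exact absurd hψ (Nat.not_lt_zero _)
  | succ fuel ih =>
    intro stack comp seen hss hsn hcn hdisj hseen hclosed hreach hnodes hS0 hψ
    cases stack with
    | nil =>
      simp only [solDfs]
      refine ⟨hcn, ?_, ?_, ?_, ?_⟩
      · intro z hz
        rcases hz with hz | hz
        · simp at hz
        · exact hz
      · intro z hz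
        exact ⟨hreach z (Or.inr hz), hnodes z (Or.inr hz), hS0 z (Or.inr hz)⟩
      · intro z
        rw [hseen z]; simp
      · exact hclosed
    | cons x rest =>
      simp only [solDfs]
      obtain ⟨P, hPnd, hPmem, hPst, hPsn, hPmark⟩ := push_spec adj (adj.getD x []) rest seen
      have hxseen : x ∈ seen := hss x (by simp)
      have hxnodes : x ∈ nodes := hnodes x (Or.inl (by simp))
      have hxreach : ReachA adj n0 x := hreach x (Or.inl (by simp))
      have hxS : ¬ S x := hS0 x (Or.inl (by simp))
      have hxcomp : x ∉ comp := fun h => hdisj x h (by simp)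
      have hxrest : x ∉ rest := (List.nodup_cons.mp hsn).1
      have hrestnd : rest.Nodup := (List.nodup_cons.mp hsn).2
      have hPnodes : ∀ y ∈ P, y ∈ nodes :=
        fun y hy => (hQ x y (hPmem y hy).1).mp hxnodes
      have hPnseen : ∀ y ∈ P, y ∉ seen := fun y hy => (hPmem y hy).2
      have hcompseen : ∀ z ∈ comp, z ∈ seen :=
        fun z hz => (hseen z).mpr (Or.inr (Or.inl hz))
      obtain ⟨ihnd, ihsub, ihsound, ihseen, ihcl⟩ :=
        ih (List.foldl (fun (p : List Int × PySem.Set Int) y =>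
              if p.2.contains y then p else (y :: p.1, p.2.add y)) (rest, seen) (adj.getD x [])).1
          (comp ++ [x])
          (List.foldl (fun (p : List Int × PySem.Set Int) y =>
              if p.2.contains y then p else (y :: p.1, p.2.add y)) (rest, seen) (adj.getD x [])).2
          (by
            intro z hz
            rw [hPst] at hz
            rcases List.mem_append.mp hz with hz | hz
            · exact (hPsn z).mpr (Or.inr hz)
            · exact (hPsn z).mpr (Or.inl (hss z (List.mem_cons_of_mem _ hz))))
          (by
            rw [hPst]
            exact List.Nodup.append hPnd hrestnd
              (fun a ha1 ha2 => hPnseen a ha1 (hss a (List.mem_cons_of_mem _ ha2))))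
          (by
            refine List.Nodup.append hcn (List.nodup_singleton x) ?_
            intro a ha hb
            rw [List.mem_singleton] at hb
            subst hb
            exact hxcomp ha)
          (by
            intro z hz
            rw [hPst]
            rcases List.mem_append.mp hz with hz | hz
            · intro hmem
              rcases List.mem_append.mp hmem with h | h
              · exact hPnseen z h (hcompseen z hz)
              · exact hdisj z hz (List.mem_cons_of_mem _ h)
            · rw [List.mem_singleton] at hz; subst hz
              intro hmem
              rcases List.mem_append.mp hmem with h | h
              · exact hPnseen z h hxseen
              · exact hxrest h)
          (by
            intro z
            rw [hPsn z, hseen z, hPst]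
            simp only [List.mem_append, List.mem_cons, List.mem_singleton,
              List.not_mem_nil, or_false]
            tauto)
          (by
            intro z hz y hy
            rcases List.mem_append.mp hz with hz | hz
            · exact (hPsn y).mpr (Or.inl (hclosed z hz y hy))
            · rw [List.mem_singleton] at hz; subst hz
              exact hPmark y hy)
          (by
            intro z hz
            rcases hz with hz | hz
            · rw [hPst] at hz
              rcases List.mem_append.mp hz with hz | hz
              · exact Relation.ReflTransGen.tail hxreach (hPmem z hz).1
              · exact hreach z (Or.inl (List.mem_cons_of_mem _ hz))
            · rcases List.mem_append.mp hz with hz | hz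
              · exact hreach z (Or.inr hz)
              · rw [List.mem_singleton] at hz; subst hz; exact hxreach)
          (by
            intro z hz
            rcases hz with hz | hz
            · rw [hPst] at hz
              rcases List.mem_append.mp hz with hz | hz
              · exact hPnodes z hz
              · exact hnodes z (Or.inl (List.mem_cons_of_mem _ hz))
            · rcases List.mem_append.mp hz with hz | hz
              · exact hnodes z (Or.inr hz)
              · rw [List.mem_singleton] at hz; subst hz; exact hxnodes)
          (by
            intro z hz
            rcases hz with hz | hz
            · rw [hPst] at hz
              rcases List.mem_append.mp hz with hz | hz
              · exact fun hSz => hPnseen z hz ((hseen z).mpr (Or.inl hSz))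
              · exact hS0 z (Or.inl (List.mem_cons_of_mem _ hz))
            · rcases List.mem_append.mp hz with hz | hz
              · exact hS0 z (Or.inr hz)
              · rw [List.mem_singleton] at hz; subst hz; exact hxS)
          (by
            have hp := psi_push nodes seen
              (List.foldl (fun (p : List Int × PySem.Set Int) y =>
                if p.2.contains y then p else (y :: p.1, p.2.add y)) (rest, seen) (adj.getD x [])).2
              P hPnd hPnodes hPnseen hPsn
            have hlen : (List.foldl (fun (p : List Int × PySem.Set Int) y =>
                if p.2.contains y then p else (y :: p.1, p.2.add y)) (rest, seen) (adj.getD x [])).1.length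
                = P.length + rest.length := by
              rw [hPst, List.length_append]
            rw [hlen]
            simp only [List.length_cons] at hψ
            omega)
      refine ⟨ihnd, ?_, ihsound, ihseen, ihcl⟩
      intro z hz
      rcases hz with hz | hz
      · rcases List.mem_cons.mp hz with hz | hz
        · subst hz
          exact ihsub z (Or.inr (List.mem_append.mpr (Or.inr (by simp))))
        · refine ihsub z (Or.inl ?_)
          rw [hPst]
          exact List.mem_append.mpr (Or.inr hz)
      · exact ihsub z (Or.inr (List.mem_append.mpr (Or.inl hz)))

-- ---------- answer-accumulator additivity ----------
lemma stepA_fold_add (adj : PySem.Dict Int (List Int)) (fuel : Nat) :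
    ∀ (l : List Int) (st : (Int × Int) × PySem.Dict Int Bool),
    l.foldl (solStepA adj fuel) st
      = (((l.foldl (solStepA adj fuel) ((0, 0), st.2)).1.1 + st.1.1,
          (l.foldl (solStepA adj fuel) ((0, 0), st.2)).1.2 + st.1.2),
         (l.foldl (solStepA adj fuel) ((0, 0), st.2)).2) := by
  intro l
  induction l with
  | nil => intro st; simp
  | cons n l ih =>
    intro st
    simp only [List.foldl_cons]
    rw [ih (solStepA adj fuel st n), ih (solStepA adj fuel ((0, 0), st.2) n)]
    have h1 : (solStepA adj fuel st n).2 = (solStepA adj fuel ((0, 0), st.2) n).2 := by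
      simp only [solStepA]; split_ifs <;> rfl
    have h2 : (solStepA adj fuel st n).1.1
        = (solStepA adj fuel ((0, 0), st.2) n).1.1 + st.1.1 := by
      simp only [solStepA]; split_ifs <;> simp <;> ring
    have h3 : (solStepA adj fuel st n).1.2
        = (solStepA adj fuel ((0, 0), st.2) n).1.2 + st.1.2 := by
      simp only [solStepA]; split_ifs <;> simp <;> ring
    rw [h1, h2, h3]
    exact Prod.ext (Prod.ext (by ring) (by ring)) rfl

lemma stepB_fold_add (adj : PySem.Dict Int (List Int)) (fuel : Nat) :
    ∀ (l : List Int) (st : (Int × Int) × PySem.Set Int),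
    l.foldl (solStepB adj fuel) st
      = (((l.foldl (solStepB adj fuel) ((0, 0), st.2)).1.1 + st.1.1,
          (l.foldl (solStepB adj fuel) ((0, 0), st.2)).1.2 + st.1.2),
         (l.foldl (solStepB adj fuel) ((0, 0), st.2)).2) := by
  intro l
  induction l with
  | nil => intro st; simp
  | cons n l ih =>
    intro st
    simp only [List.foldl_cons]
    rw [ih (solStepB adj fuel st n), ih (solStepB adj fuel ((0, 0), st.2) n)]
    have h1 : (solStepB adj fuel st n).2 = (solStepB adj fuel ((0, 0), st.2) n).2 := by
      simp only [solStepB]; split_ifs <;> rfl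
    have h2 : (solStepB adj fuel st n).1.1
        = (solStepB adj fuel ((0, 0), st.2) n).1.1 + st.1.1 := by
      simp only [solStepB]; split_ifs <;> simp <;> ring
    have h3 : (solStepB adj fuel st n).1.2
        = (solStepB adj fuel ((0, 0), st.2) n).1.2 + st.1.2 := by
      simp only [solStepB]; split_ifs <;> simp <;> ring
    rw [h1, h2, h3]
    exact Prod.ext (Prod.ext (by ring) (by ring)) rfl

lemma iso_fold_add (adj : PySem.Dict Int (List Int)) :
    ∀ (l : List Int) (st : Int × Int),
    l.foldl (solIso adj) st
      = ((l.foldl (solIso adj) (0, 0)).1 + st.1, (l.foldl (solIso adj) (0, 0)).2 + st.2) := by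
  intro l
  induction l with
  | nil => intro st; simp
  | cons n l ih =>
    intro st
    simp only [List.foldl_cons]
    rw [ih (solIso adj st n), ih (solIso adj (0, 0) n)]
    have h2 : (solIso adj st n).1 = (solIso adj (0, 0) n).1 + st.1 := by
      simp only [solIso]; split_ifs <;> simp <;> ring
    have h3 : (solIso adj st n).2 = (solIso adj (0, 0) n).2 + st.2 := by
      simp only [solIso]; split_ifs <;> simp <;> ring
    rw [h2, h3]
    exact Prod.ext (by ring) (by ring)

-- ---------- the synchronised outer loop ----------
lemma loop_eq (nodes : List Int) (adj : PySem.Dict Int (List Int))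
    (hQ : ∀ x y, y ∈ Nbr adj x → (x ∈ nodes ↔ y ∈ nodes))
    (hdeg : ∀ x, adj.contains x = true → Nbr adj x ≠ [])
    (hsym : ∀ x y, y ∈ Nbr adj x → x ∈ Nbr adj y) :
    ∀ (l : List Int) (v : PySem.Dict Int Bool) (seen : PySem.Set Int) (fuel : Nat),
    (∀ x ∈ l, x ∈ nodes) →
    (∀ x, v.contains x = decide (x ∈ nodes)) →
    (∀ x ∈ nodes, (v.getD x true = true ↔ x ∈ seen)) →
    (∀ x ∈ seen, x ∈ nodes) →
    (∀ x ∈ seen, adj.contains x = true) →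
    (∀ x y, v.getD x true = true → y ∈ Nbr adj x → v.getD y true = true) →
    (∀ x ∈ seen, ∀ y ∈ Nbr adj x, y ∈ seen) →
    PhiA nodes v < fuel →
    (l.foldl (solStepA adj fuel) ((0, 0), v)).1
      = ((l.foldl (solIso adj) (0, 0)).1 + (l.foldl (solStepB adj fuel) ((0, 0), seen)).1.1,
         (l.foldl (solIso adj) (0, 0)).2 + (l.foldl (solStepB adj fuel) ((0, 0), seen)).1.2) := by
  intro l
  induction l with
  | nil => intro v seen fuel _ _ _ _ _ _ _ _; simp
  | cons node l ihl =>
    intro v seen fuel hl hkeys hsync hseennodes hseendeg hAclosed hBclosed hφ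
    have hnode : node ∈ nodes := hl node (by simp)
    have hltail : ∀ z ∈ l, z ∈ nodes := fun z hz => hl z (List.mem_cons_of_mem _ hz)
    simp only [List.foldl_cons]
    by_cases hvt : v.getD node true = true
    · -- node already visited: all three bodies are no-ops
      have hnseen : node ∈ seen := (hsync node hnode).mp hvt
      have hsA : solStepA adj fuel ((0, 0), v) node = ((0, 0), v) := by
        simp [solStepA, hvt]
      have hsI : solIso adj (0, 0) node = (0, 0) := by
        simp [solIso, hseendeg node hnseen]
      have hsB : solStepB adj fuel ((0, 0), seen) node = ((0, 0), seen) := by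
        simp [solStepB, PySem.Set.contains_eq_decide, hnseen]
      rw [hsA, hsI, hsB]
      exact ihl v seen fuel hltail hkeys hsync hseennodes hseendeg hAclosed hBclosed hφ
    · have hvtf : v.getD node true = false := by
        cases h : v.getD node true
        · rfl
        · exact absurd h hvt
      have hnotseen : node ∉ seen := fun h => hvt ((hsync node hnode).mpr h)
      by_cases hnb : adj.getD node [] = []
      · -- isolated occurrence: A's special branch = B's pass-1 contribution
        have hcont : adj.contains node = false := by
          cases h : adj.contains node with
          | false => rfl
          | true => exact absurd hnb (hdeg node h)
        have hsB : solStepB adj fuel ((0, 0), seen) node = ((0, 0), seen) := by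
          simp [solStepB, hcont]
        rw [hsB]
        have hF := ihl v seen fuel hltail hkeys hsync hseennodes hseendeg hAclosed hBclosed hφ
        by_cases hpar : (2 : Int) ∣ node
        · have hsA : solStepA adj fuel ((0, 0), v) node = (((0 : Int) + 1, (0 : Int)), v) := by
            simp [solStepA, hvtf, hnb, hpar]
          have hsI : solIso adj (0, 0) node = ((0 : Int) + 1, (0 : Int)) := by
            simp [solIso, hcont, hpar]
          rw [hsA, hsI, stepA_fold_add adj fuel l (((0 : Int) + 1, (0 : Int)), v),
            iso_fold_add adj l ((0 : Int) + 1, (0 : Int))]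
          dsimp only
          rw [hF]
          exact Prod.ext (by dsimp only; ring) (by dsimp only; ring)
        · have hsA : solStepA adj fuel ((0, 0), v) node = (((0 : Int), (0 : Int) + 1), v) := by
            simp [solStepA, hvtf, hnb, hpar]
          have hsI : solIso adj (0, 0) node = ((0 : Int), (0 : Int) + 1) := by
            simp [solIso, hcont, hpar]
          rw [hsA, hsI, stepA_fold_add adj fuel l (((0 : Int), (0 : Int) + 1), v),
            iso_fold_add adj l ((0 : Int), (0 : Int) + 1)]
          dsimp only
          rw [hF]
          exact Prod.ext (by dsimp only; ring) (by dsimp only; ring)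
      · -- a real component: A's recursive DFS vs B's stack DFS
        have hcont : adj.contains node = true := by
          cases h : adj.contains node with
          | true => rfl
          | false => exact absurd (PySem.Dict.getD_of_not_contains adj ([] : List Int) h) hnb
        obtain ⟨LA, hAnd, hAn, hAsound, hAdesc, hAcont, hAcomp, hAcnt⟩ :=
          checkA_spec nodes adj hQ fuel v (0, 0) node hnode hvtf hkeys hφ
        have hψ0 : PsiB nodes (seen.add node) + ([node] : List Int).length < fuel := by
          have h1 := psi_add_lt nodes seen node hnode hnotseen
          have h2 := psi_eq_phi nodes v seen hsync
          simp only [List.length_cons, List.length_nil]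
          omega
        obtain ⟨hBnd, hBsub, hBsound, hBseen, hBcl⟩ :=
          dfs_spec nodes adj hQ (fun z => z ∈ seen) node fuel [node] [] (seen.add node)
            (by
              intro z hz
              rw [List.mem_singleton] at hz
              exact (PySem.Set.mem_add seen node z).mpr (Or.inr hz))
            (List.nodup_singleton _) List.nodup_nil
            (by intro z hz; simp at hz)
            (by
              intro z
              rw [PySem.Set.mem_add]
              simp)
            (by intro z hz; simp at hz)
            (by
              intro z hz
              rcases hz with hz | hz
              · rw [List.mem_singleton] at hz; subst hz; exact Relation.ReflTransGen.refl
              · simp at hz)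
            (by
              intro z hz
              rcases hz with hz | hz
              · rw [List.mem_singleton] at hz; subst hz; exact hnode
              · simp at hz)
            (by
              intro z hz
              rcases hz with hz | hz
              · rw [List.mem_singleton] at hz; subst hz; exact hnotseen
              · simp at hz)
            hψ0
        -- both visit lists are exactly the new component
        have hAchar := comp_unique adj (fun z => v.getD z true = true) hAclosed node LA hAn
          (fun z hz => ⟨(hAsound z hz).2.2, by
            intro h
            have h2 := (hAsound z hz).2.1
            rw [h] at h2
            exact absurd h2 (by simp)⟩)
          (fun z hz y hy => by
            have h := hAcomp z hz y hy
            rw [hAdesc y] at h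
            by_cases hL : y ∈ LA
            · exact Or.inl hL
            · rw [if_neg hL] at h; exact Or.inr h)
        have hnB : node ∈ (solDfs adj fuel [node] [] (seen.add node)).1 :=
          hBsub node (Or.inl (by simp))
        have hBchar := comp_unique adj (fun z => z ∈ seen)
          (fun x y hx hy => hBclosed x hx y hy) node
          (solDfs adj fuel [node] [] (seen.add node)).1 hnB
          (fun z hz => ⟨(hBsound z hz).1, (hBsound z hz).2.2⟩)
          (fun z hz y hy => by
            have h := hBcl z hz y hy
            rcases (hBseen y).mp h with h | h
            · exact Or.inr h
            · exact Or.inl h)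
        have hmemiff : ∀ z, z ∈ LA ↔ z ∈ (solDfs adj fuel [node] [] (seen.add node)).1 := by
          intro z
          rw [hAchar z, hBchar z]
          constructor
          · rintro ⟨hr, hnv⟩
            exact ⟨hr, fun hzs => hnv ((hsync z (reach_nodes nodes adj hQ hnode hr)).mpr hzs)⟩
          · rintro ⟨hr, hzs⟩
            exact ⟨hr, fun hv => hzs ((hsync z (reach_nodes nodes adj hQ hnode hr)).mp hv)⟩
        have hperm : LA.Perm (solDfs adj fuel [node] [] (seen.add node)).1 :=
          (List.perm_ext_iff_of_nodup hAnd hBnd).mpr hmemiff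
        have hc0 : LA.countP (bkt adj)
            = (solDfs adj fuel [node] [] (seen.add node)).1.countP (bkt adj) :=
          hperm.countP_eq _
        have hlen : LA.length = (solDfs adj fuel [node] [] (seen.add node)).1.length :=
          hperm.length_eq
        have hsplit : LA.length = LA.countP (bkt adj) + LA.countP (fun z => !(bkt adj z)) := by
          have h := List.length_eq_countP_add_countP (bkt adj) (l := LA)
          have h2 : LA.countP (fun z => decide ¬(bkt adj z = true))
              = LA.countP (fun z => !(bkt adj z)) :=
            List.countP_congr (by intro a _; cases bkt adj a <;> simp)
          rw [h2] at h
          exact h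
        have hA2fst : (solCheck adj fuel v (0, 0) node).2.1
            = (0 : Int) + ((LA.countP (bkt adj) : Nat) : Int) := congrArg Prod.fst hAcnt
        have hA2snd : (solCheck adj fuel v (0, 0) node).2.2
            = (0 : Int) + ((LA.countP (fun z => !(bkt adj z)) : Nat) : Int) :=
          congrArg Prod.snd hAcnt
        have e1 : (solCheck adj fuel v (0, 0) node).2.1
            = (((solDfs adj fuel [node] [] (seen.add node)).1.countP (bkt adj) : Nat) : Int) := by
          rw [hA2fst, hc0]; ring
        have e2 : (solCheck adj fuel v (0, 0) node).2.2
            = ((solDfs adj fuel [node] [] (seen.add node)).1.length : Int)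
              - (((solDfs adj fuel [node] [] (seen.add node)).1.countP (bkt adj) : Nat) : Int) := by
          rw [hA2snd]
          omega
        -- the step bodies
        have hsA2 : (solStepA adj fuel ((0, 0), v) node).2 = (solCheck adj fuel v (0, 0) node).1 := by
          simp [solStepA, hvtf, hnb]
        have hsA11 : (solStepA adj fuel ((0, 0), v) node).1.1
            = (0 : Int) + (if (solCheck adj fuel v (0, 0) node).2.2 == 1 then (1 : Int) else 0) := by
          simp [solStepA, hvtf, hnb]
        have hsA12 : (solStepA adj fuel ((0, 0), v) node).1.2
            = (0 : Int) + (if (solCheck adj fuel v (0, 0) node).2.1 == 1 then (1 : Int) else 0) := by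
          simp [solStepA, hvtf, hnb]
        have hsBcond : (adj.contains node && !(seen.contains node)) = true := by
          simp [hcont, PySem.Set.contains_eq_decide, hnotseen]
        have hsB2 : (solStepB adj fuel ((0, 0), seen) node).2
            = (solDfs adj fuel [node] [] (seen.add node)).2 := by
          simp only [solStepB]
          rw [hsBcond, if_pos rfl]
        have hsB11 : (solStepB adj fuel ((0, 0), seen) node).1.1
            = (0 : Int) + (if (((solDfs adj fuel [node] [] (seen.add node)).1.length : Int)
                - (((solDfs adj fuel [node] [] (seen.add node)).1.countP (bkt adj) : Nat) : Int)) == 1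
              then (1 : Int) else 0) := by
          simp only [solStepB]
          rw [hsBcond, if_pos rfl]
          rfl
        have hsB12 : (solStepB adj fuel ((0, 0), seen) node).1.2
            = (0 : Int) + (if (((solDfs adj fuel [node] [] (seen.add node)).1.countP (bkt adj) : Nat) : Int) == 1
              then (1 : Int) else 0) := by
          simp only [solStepB]
          rw [hsBcond, if_pos rfl]
          rfl
        have hsI : solIso adj (0, 0) node = (0, 0) := by
          simp [solIso, hcont]
        -- invariants for the remaining suffix
        have hF := ihl (solCheck adj fuel v (0, 0) node).1
            (solDfs adj fuel [node] [] (seen.add node)).2 fuel hltail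
          (fun x => (hAcont x).trans (hkeys x))
          (by
            intro x hx
            rw [hAdesc x]
            by_cases hL : x ∈ LA
            · rw [if_pos hL]
              constructor
              · intro _; exact (hBseen x).mpr (Or.inr ((hmemiff x).mp hL))
              · intro _; rfl
            · rw [if_neg hL, hBseen x]
              have hnotB : x ∉ (solDfs adj fuel [node] [] (seen.add node)).1 :=
                fun h => hL ((hmemiff x).mpr h)
              constructor
              · intro hv; exact Or.inl ((hsync x hx).mp hv)
              · rintro (h | h)
                · exact (hsync x hx).mpr h
                · exact absurd h hnotB)
          (by
            intro x hx
            rcases (hBseen x).mp hx with h | h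
            · exact hseennodes x h
            · exact (hBsound x h).2.1)
          (by
            intro x hx
            rcases (hBseen x).mp hx with h | h
            · exact hseendeg x h
            · by_cases hxn : x = node
              · subst hxn; exact hcont
              · have hr := (hBsound x h).1
                rcases Relation.ReflTransGen.cases_tail hr with h0 | ⟨u, _, hu⟩
                · exact absurd h0 hxn
                · have husym := hsym u x hu
                  cases hca : adj.contains x with
                  | true => rfl
                  | false =>
                    have hemp := PySem.Dict.getD_of_not_contains adj ([] : List Int) hca
                    rw [Nbr, hemp] at husym
                    simp at husym)
          (by
            intro z y hz hy
            rw [hAdesc z] at hz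
            by_cases hL : z ∈ LA
            · exact hAcomp z hL y hy
            · rw [if_neg hL] at hz
              have hvy := hAclosed z y hz hy
              rw [hAdesc y]
              by_cases hLy : y ∈ LA
              · rw [if_pos hLy]
              · rw [if_neg hLy]; exact hvy)
          (by
            intro x hx y hy
            rcases (hBseen x).mp hx with h | h
            · exact (hBseen y).mpr (Or.inl (hBclosed x h y hy))
            · exact hBcl x h y hy)
          (lt_of_le_of_lt
            (phi_mono nodes (fun x hx => by
              rw [hAdesc x]
              by_cases h : x ∈ LA <;> simp [h, hx]))
            hφ)
        -- assemble
        rw [stepA_fold_add adj fuel l (solStepA adj fuel ((0, 0), v) node),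
          stepB_fold_add adj fuel l (solStepB adj fuel ((0, 0), seen) node),
          hsA2, hsB2, hsA11, hsA12, hsB11, hsB12, hsI, e1, e2,
          iso_fold_add adj l (0, 0)]
        dsimp only
        rw [hF]
        exact Prod.ext (by dsimp only; ring) (by dsimp only; ring)


-- ===== VERDICT (by name: the statement is the Claim_ definition above) =====
theorem solution_spec : Claim_equal_solution := by
  intro nodes edges _hdom hpre
  unfold Spec_solution
  have hQ := adj_nodes nodes edges hpre
  have hdeg := adj_deg edges
  have hsym := adj_sym edges
  have hmain := loop_eq nodes (solBuildE edges) hQ hdeg hsym nodes (solVisited0 nodes)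
      PySem.Set.empty (nodes.length + 1)
      (fun x hx => hx)
      (fun x => visited0_contains nodes x)
      (by
        intro x hx
        rw [visited0_getD nodes x]
        simp [hx, PySem.Set.empty])
      (by intro x hx; simp [PySem.Set.empty] at hx)
      (by intro x hx; simp [PySem.Set.empty] at hx)
      (by
        intro x y hx hy
        rw [visited0_getD] at hx ⊢
        have hx' : x ∉ nodes := by
          intro h; rw [if_pos h] at hx; exact absurd hx (by simp)
        have hy' : y ∉ nodes := fun h => hx' ((hQ x y hy).mpr h)
        rw [if_neg hy'])
      (by intro x hx; simp [PySem.Set.empty] at hx)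
      (by
        have h1 : PhiA nodes (solVisited0 nodes) ≤ nodes.toFinset.card :=
          Finset.card_le_card (Finset.filter_subset _ _)
        have h2 := List.toFinset_card_le nodes
        omega)
  have hA : solution nodes edges
      = [(nodes.foldl (solStepA (solBuildE edges) (nodes.length + 1)) ((0, 0), solVisited0 nodes)).1.1,
         (nodes.foldl (solStepA (solBuildE edges) (nodes.length + 1)) ((0, 0), solVisited0 nodes)).1.2] := rfl
  have hBdef : solution_alt nodes edges
      = [(nodes.foldl (solStepB (solBuildE edges) (nodes.length + 1))
            (nodes.foldl (solIso (solBuildE edges)) (0, 0), PySem.Set.empty)).1.1,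
         (nodes.foldl (solStepB (solBuildE edges) (nodes.length + 1))
            (nodes.foldl (solIso (solBuildE edges)) (0, 0), PySem.Set.empty)).1.2] := rfl
  rw [hA, hBdef,
      stepB_fold_add (solBuildE edges) (nodes.length + 1) nodes
        (nodes.foldl (solIso (solBuildE edges)) (0, 0), PySem.Set.empty)]
  simp only []
  rw [hmain]
  simp only [List.cons.injEq, and_true]
  constructor <;> ring
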